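-- pv_equiv track=rewrite | github.com/klayza/Osu-Map-Grabber | extractor.py | stripID
-- ===== SOURCE A (Python) =====
-- def stripID(folder):
--     condition = True
--     temp_string = ""
--     for char in folder:
--         if char == " ":
--             condition = False
--         while condition:
--             if char in "0123456789":
--                 break
--             else:
--                 break
--         else:
--             temp_string += char
--     return temp_string.strip()
-- ===== SOURCE B (Python) =====
-- def stripID(folder):
--     idx = folder.find(" ")
--     if idx == -1:
--         return ""
--     return folder[idx:].strip()
-- ===== Notes on version B (the rewrite author's own statement) =====
-- stated objective: simpler
-- what changed: Replaces the per-character accumulation loop with its dead while/else digit logic by a single find of the first space and one slice+strip of the suffix.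
import Mathlib
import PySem

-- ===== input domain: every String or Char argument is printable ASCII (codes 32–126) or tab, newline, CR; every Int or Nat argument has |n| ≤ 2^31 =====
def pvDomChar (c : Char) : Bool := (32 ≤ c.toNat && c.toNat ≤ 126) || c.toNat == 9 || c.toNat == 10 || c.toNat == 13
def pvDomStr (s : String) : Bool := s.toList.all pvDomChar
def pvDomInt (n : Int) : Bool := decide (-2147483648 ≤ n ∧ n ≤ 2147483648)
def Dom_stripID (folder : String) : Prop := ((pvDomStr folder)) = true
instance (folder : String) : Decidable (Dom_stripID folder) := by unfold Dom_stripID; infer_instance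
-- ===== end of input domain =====

-- B replaces A's per-character loop (with its dead while/else digit logic) by find-first-space + slice + strip: simpler.


-- ===== PORT A =====
-- one iteration of A's for-loop: state = (condition, temp_string as List Char);
-- the while-loop's two branches both break immediately, so with condition true the state is unchanged
def stripIDStep (st : Bool × List Char) (char : Char) : Bool × List Char :=
  let condition := if char = ' ' then false else st.1
  if condition then
    (if PySem.Chars.isIn [char] "0123456789".toList then (condition, st.2) else (condition, st.2))
  else (condition, st.2 ++ [char])

def stripID (folder : String) : String :=
  PySem.Str.strip (String.ofList (folder.toList.foldl stripIDStep (true, [])).2)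

-- ===== PORT B =====
def stripID_alt (folder : String) : String :=
  if PySem.Str.find folder " " = -1 then ""
  else PySem.Str.strip (PySem.Str.slice folder (some (PySem.Str.find folder " ")) none)

-- ===== PRECONDITION & SPEC =====
def Spec_stripID (folder : String) (out : String) : Prop := out = stripID_alt folder
instance (folder : String) (out : String) : Decidable (Spec_stripID folder out) := by unfold Spec_stripID; infer_instance

-- ===== CLAIM (what is proved, stated in full; the proofs are below) =====
def Claim_equal_stripID : Prop := ∀ (folder : String), Dom_stripID folder → Spec_stripID folder (stripID folder)

-- ===== LEMMAS AND PROOFS =====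

theorem stripIDStep_false (l : List Char) (acc : List Char) :
    l.foldl stripIDStep (false, acc) = (false, acc ++ l) := by
  induction l generalizing acc with
  | nil => simp
  | cons c t ih =>
    simp only [List.foldl_cons, stripIDStep]
    split_ifs <;> simp_all

theorem stripIDStep_true_nospace (l : List Char) (acc : List Char) (h : ' ' ∉ l) :
    l.foldl stripIDStep (true, acc) = (true, acc) := by
  induction l generalizing acc with
  | nil => rfl
  | cons c t ih =>
    simp only [List.mem_cons, not_or] at h
    simp only [List.foldl_cons, stripIDStep]
    have hc : c ≠ ' ' := fun e => h.1 e.symm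
    simp only [if_neg hc]
    split_ifs <;> exact ih acc h.2

theorem stripID_temp (folder : String) :
    (folder.toList.foldl stripIDStep (true, [])).2 =
      (if PySem.Chars.find folder.toList [' '] = -1 then []
       else folder.toList.drop (PySem.Chars.find folder.toList [' ']).toNat) := by
  set l := folder.toList with hl
  by_cases hf : PySem.Chars.find l [' '] = -1
  · rw [if_pos hf]
    have hni : ¬ [' '] <:+: l := (PySem.Chars.find_eq_neg_one_iff l [' ']).mp hf
    have hmem : ' ' ∉ l := fun hm => by
      obtain ⟨s, t, hst⟩ := List.append_of_mem hm
      exact hni ⟨s, t, by rw [hst]; simp⟩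
    rw [stripIDStep_true_nospace l [] hmem]
  · rw [if_neg hf]
    have h0 : 0 ≤ PySem.Chars.find l [' '] := by
      have := PySem.Chars.neg_one_le_find (s := l) (sub := [' '])
      omega
    obtain ⟨hpre, hmin⟩ := PySem.Chars.find_spec (s := l) (sub := [' ']) h0
    set j := (PySem.Chars.find l [' ']).toNat with hj
    obtain ⟨t, ht⟩ := hpre
    have hdrop : l.drop j = ' ' :: t := by simpa using ht.symm
    have hjlt : j < l.length := by
      by_contra hge
      rw [List.drop_eq_nil_of_le (by omega)] at hdrop
      simp at hdrop
    have htake : ' ' ∉ l.take j := by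
      intro hm
      obtain ⟨i, hi, hgi⟩ := List.mem_iff_getElem.mp hm
      have hb : i < j ∧ i < l.length := by simpa using hi
      obtain ⟨hij, hil⟩ := hb
      rw [List.getElem_take] at hgi
      refine hmin i hij ⟨l.drop (i + 1), ?_⟩
      rw [List.drop_eq_getElem_cons hil, hgi]
      rfl
    calc (l.foldl stripIDStep (true, [])).2
        = ((l.take j ++ l.drop j).foldl stripIDStep (true, [])).2 := by
          rw [List.take_append_drop]
      _ = ((l.drop j).foldl stripIDStep (true, [])).2 := by
          rw [List.foldl_append, stripIDStep_true_nospace _ [] htake]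
      _ = l.drop j := by
          rw [hdrop]
          simp only [List.foldl_cons, stripIDStep]
          simp [stripIDStep_false]

theorem stripID_spec : Claim_equal_stripID := by
  intro folder _
  unfold Spec_stripID stripID stripID_alt
  have hfind : PySem.Str.find folder " " = PySem.Chars.find folder.toList [' '] := by
    simp [PySem.Str.find_eq]
  rw [stripID_temp folder, hfind]
  by_cases hf : PySem.Chars.find folder.toList [' '] = -1
  · rw [if_pos hf, if_pos hf]
    rfl
  · rw [if_neg hf, if_neg hf]
    have h0 : 0 ≤ PySem.Chars.find folder.toList [' '] := by
      have := PySem.Chars.neg_one_le_find (s := folder.toList) (sub := [' '])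
      omega
    congr 1
    apply String.ext
    simp [PySem.Str.toList_slice, PySem.Chars.slice_eq_listSlice,
      PySem.List.slice_from _ h0, String.toList_ofList]
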